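-- pv_equiv track=rewrite | github.com/kzjn10/Code4Fun | src/FindKthCharacter.py | find_kth_character
-- ===== SOURCE A (Python) =====
-- def find_kth_character(k: int) -> str:
--     word = "a"
--
--     # Shift current charactor to next charactor, if z -> a
--     def shift_to_char(c: str) -> str:
--         new_index = (ord(c) - ord('a') + 1) % 26 + ord('a')
--         return chr(new_index)
--
--     while len(word) < k:
--         new_string = ''.join(shift_to_char(c) for c in word)
--         word += new_string
--     return word[k - 1]
-- ===== SOURCE B (Python) =====
-- def find_kth_character(k: int) -> str:
--     # The n-th doubling step appends the shifted copy, so the character at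
--     # 0-based position i is 'a' shifted once per set bit of i.
--     return chr((k - 1).bit_count() % 26 + ord('a'))
-- ===== Notes on version B (the rewrite author's own statement) =====
-- stated objective: faster
-- what changed: Replaces the O(k)-space string-doubling loop by a closed form: the answer is 'a' shifted once per set bit of k-1, i.e. chr of popcount(k-1) modulo the alphabet size plus ord('a').
-- intended difference: At k = 0 (outside the 1-indexed domain) A returns 'a' only via Python's negative-index wraparound word[-1], while B returns 'b' from the popcount formula; B's value is the formula's natural extension rather than an indexing accident. — e.g. on find_kth_character(0): A returns "a", B returns "b"
import Mathlib
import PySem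

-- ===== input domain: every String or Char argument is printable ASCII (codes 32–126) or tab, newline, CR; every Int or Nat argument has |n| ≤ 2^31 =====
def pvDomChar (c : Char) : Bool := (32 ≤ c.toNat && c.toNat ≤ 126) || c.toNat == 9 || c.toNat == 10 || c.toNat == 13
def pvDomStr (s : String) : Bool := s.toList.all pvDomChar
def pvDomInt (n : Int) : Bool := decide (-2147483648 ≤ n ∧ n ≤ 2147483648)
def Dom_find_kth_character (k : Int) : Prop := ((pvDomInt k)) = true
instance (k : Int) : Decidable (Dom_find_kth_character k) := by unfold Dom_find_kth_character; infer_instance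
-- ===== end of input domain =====

-- B replaces A's O(k)-space doubling loop by the closed form popcount(k-1) % 26 + 'a' (asymptotically faster, O(log k)).

-- ===== PORT A =====
-- shift_to_char: next letter, z wraps to a
def pvShift (c : Char) : Char :=
  Char.ofNat ((c.toNat - 97 + 1) % 26 + 97)

-- the while loop: word grows by its shifted copy until len(word) >= k
def pvLoop (k : Int) (word : List Char) (h : 0 < word.length) : List Char :=
  if (word.length : Int) < k then
    pvLoop k (word ++ word.map pvShift) (by simp; omega)
  else word
termination_by (k - word.length).toNat
decreasing_by simp; omega

def find_kth_character (k : Int) : String :=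
  match PySem.List.pyGet? (pvLoop k ['a'] (by decide)) (k - 1) with
  | some c => String.mk [c]   -- word[k-1]
  | none => ""                -- IndexError (excluded by Pre_)

-- ===== PORT B =====
-- (k-1).bit_count() — Python's bit_count is the popcount of the absolute value
def pvPopcount (n : Nat) : Nat :=
  if n = 0 then 0 else n % 2 + pvPopcount (n / 2)
termination_by n
decreasing_by exact Nat.div_lt_self (by omega) (by omega)

def find_kth_character_alt (k : Int) : String :=
  String.mk [Char.ofNat (pvPopcount (k - 1).natAbs % 26 + 97)]

-- ===== PRECONDITION & SPEC =====
-- Pre_ excludes k < 0, on which A raises IndexError (word[k-1] out of range).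
def Pre_find_kth_character (k : Int) : Prop := 0 ≤ k
instance (k : Int) : Decidable (Pre_find_kth_character k) := by unfold Pre_find_kth_character; infer_instance
def pvWitness_find_kth_character : Int := (5)

-- At k = 0 (outside the 1-indexed domain) A returns "a" only via Python's negative-index
-- wraparound word[-1], while B returns "b" from the popcount formula; B's value is the
-- formula's natural extension rather than an indexing accident.
def D_find_kth_character (k : Int) : Prop := k = 0
instance (k : Int) : Decidable (D_find_kth_character k) := by unfold D_find_kth_character; infer_instance

def Spec_find_kth_character (k : Int) (out : String) : Prop := ¬ D_find_kth_character k → out = find_kth_character_alt k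
instance (k : Int) (out : String) : Decidable (Spec_find_kth_character k out) := by unfold Spec_find_kth_character; infer_instance

def pvDiffWitness_find_kth_character : Int := (0)
def pvDiffWitnessOut_find_kth_character : String × String := ("a", "b")

-- ===== CLAIM (what is proved, stated in full; the proofs are below) =====
def Claim_unchanged_find_kth_character : Prop := ∀ (k : Int), Dom_find_kth_character k → Pre_find_kth_character k → Spec_find_kth_character k (find_kth_character k)
def Claim_changed_find_kth_character : Prop := Dom_find_kth_character (pvDiffWitness_find_kth_character) ∧ Pre_find_kth_character (pvDiffWitness_find_kth_character) ∧ D_find_kth_character (pvDiffWitness_find_kth_character) ∧ find_kth_character (pvDiffWitness_find_kth_character) = pvDiffWitnessOut_find_kth_character.1 ∧ find_kth_character_alt (pvDiffWitness_find_kth_character) = pvDiffWitnessOut_find_kth_character.2 ∧ pvDiffWitnessOut_find_kth_character.1 ≠ pvDiffWitnessOut_find_kth_character.2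
def Claim_exact_find_kth_character : Prop := ∀ (k : Int), Dom_find_kth_character k → Pre_find_kth_character k → D_find_kth_character k → find_kth_character k ≠ find_kth_character_alt k

-- ===== LEMMAS AND PROOFS =====

theorem pvPopcount_step (i : Nat) : pvPopcount i = i % 2 + pvPopcount (i / 2) := by
  rcases Nat.eq_zero_or_pos i with h | h
  · subst h; simp [pvPopcount]
  · rw [pvPopcount]; simp [Nat.pos_iff_ne_zero.mp h]

theorem pvPopcount_pow_add (n i : Nat) (hi : i < 2 ^ n) :
    pvPopcount (2 ^ n + i) = pvPopcount i + 1 := by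
  induction n generalizing i with
  | zero =>
    interval_cases i
    simp [pvPopcount]
  | succ n ih =>
    rw [pvPopcount_step (2 ^ (n + 1) + i), pvPopcount_step i]
    have h2 : (2 ^ (n + 1) + i) / 2 = 2 ^ n + i / 2 := by
      omega
    have hm : (2 ^ (n + 1) + i) % 2 = i % 2 := by
      omega
    rw [h2, hm, ih (i / 2) (by omega)]
    omega

theorem toNat_ofNat_small (n : Nat) (h : n < 55296) : (Char.ofNat n).toNat = n := by
  rw [Char.toNat_ofNat, if_pos (Or.inl h)]

theorem pvShift_formula (p : Nat) :
    pvShift (Char.ofNat (p % 26 + 97)) = Char.ofNat ((p + 1) % 26 + 97) := by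
  unfold pvShift
  rw [toNat_ofNat_small _ (by omega)]
  congr 1
  omega

-- the loop invariant: every position i holds 'a' shifted popcount(i) times
def pvGood (word : List Char) : Prop :=
  ∀ (i : Nat) (hi : i < word.length), word[i] = Char.ofNat (pvPopcount i % 26 + 97)

theorem pvGood_step (word : List Char) (n : Nat) (hlen : word.length = 2 ^ n)
    (hg : pvGood word) : pvGood (word ++ word.map pvShift) := by
  intro i hi
  simp at hi
  by_cases h : i < word.length
  · rw [List.getElem_append_left h]; exact hg i h
  · have h1 : i - word.length < (word.map pvShift).length := by simp; omega
    rw [List.getElem_append_right (by omega)]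
    rw [List.getElem_map]
    rw [hg (i - word.length) (by simp at h1; omega)]
    rw [pvShift_formula]
    have heq : i = 2 ^ n + (i - word.length) := by omega
    have hpc : pvPopcount i = pvPopcount (i - word.length) + 1 := by
      conv_lhs => rw [heq]
      exact pvPopcount_pow_add n _ (by omega)
    rw [hpc]

theorem pvLoop_spec (k : Int) (word : List Char) (h : 0 < word.length)
    (hpow : ∃ n, word.length = 2 ^ n) (hg : pvGood word) :
    pvGood (pvLoop k word h) ∧ ¬ ((pvLoop k word h).length : Int) < k := by
  fun_induction pvLoop with
  | case1 word h hlt ih =>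
    obtain ⟨n, hn⟩ := hpow
    have hmap : List.map (fun x : {x // x ∈ word} => pvShift ↑x) word.attach = word.map pvShift := by
      simp
    simp only [hmap] at ih
    exact ih ⟨n + 1, by simp [hn]; try ring⟩ (pvGood_step word n hn hg)
  | case2 word h hlt =>
    exact ⟨hg, hlt⟩

theorem find_kth_character_eq (k : Int) (hk : 1 ≤ k) :
    find_kth_character k = find_kth_character_alt k := by
  unfold find_kth_character
  have h := pvLoop_spec k ['a'] (by decide) ⟨0, rfl⟩
    (by intro i hi
        have : i = 0 := by simp at hi; omega
        subst this; simp [pvPopcount])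
  set w := pvLoop k ['a'] (by decide) with hw
  have hlen : k ≤ (w.length : Int) := by omega
  have hidx : (k - 1).toNat < w.length := by omega
  have hget : PySem.List.pyGet? w (k - 1) = some w[(k - 1).toNat] :=
    PySem.List.pyGet?_eq_some_getElem w (by omega) (by omega)
  rw [hget, h.1 (k - 1).toNat hidx]
  unfold find_kth_character_alt
  have : (k - 1).natAbs = (k - 1).toNat := by omega
  rw [this]

theorem find_kth_character_at_zero : find_kth_character 0 = "a" := by
  unfold find_kth_character
  rw [pvLoop]
  norm_num
  decide

-- ===== VERDICT (by name: the statement is the Claim_ definition above) =====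
theorem find_kth_character_spec : Claim_unchanged_find_kth_character := by
  intro k _ hpre hd
  exact find_kth_character_eq k (by unfold Pre_find_kth_character at hpre; unfold D_find_kth_character at hd; omega)

theorem find_kth_character_alt_at_zero : find_kth_character_alt 0 = "b" := by
  simp [find_kth_character_alt, pvPopcount]
  decide

theorem find_kth_character_changed : Claim_changed_find_kth_character := by
  unfold Claim_changed_find_kth_character
  refine ⟨by decide, by decide, by decide, find_kth_character_at_zero, find_kth_character_alt_at_zero, by decide⟩

theorem find_kth_character_tight : Claim_exact_find_kth_character := by
  intro k _ _ hd
  unfold D_find_kth_character at hd; subst hd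
  rw [find_kth_character_at_zero, find_kth_character_alt_at_zero]
  decide
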